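-- pv_equiv track=rewrite | github.com/JMittelbach/BiTUGA | utils/plot_unitigs_with_minimap.py | longest_unitig_for_chr
-- ===== SOURCE A (Python) =====
-- def parse_p_value(header_text: str) -> str:
--     for part in header_text.split():
--         if part.startswith("p="):
--             return part[2:]
--     return "NA"
--
-- def parse_male_female(header_text: str):
--     male = None
--     female = None
--     for part in header_text.split():
--         if part.startswith("male="):
--             try:
--                 male = int(part.split("=", 1)[1])
--             except ValueError:
--                 pass
--         elif part.startswith("female="):
--             try:
--                 female = int(part.split("=", 1)[1])
--             except ValueError:
--                 pass
--     return male, female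
--
-- def longest_unitig_for_chr(intervals_by_chr, chr_name: str, lengths_map, headers_map, require_male_biased: bool = False):
--     if chr_name not in intervals_by_chr:
--         return None
--     best_biased = None
--     best_any = None
--     for start, end, uid in intervals_by_chr[chr_name]:
--         length = lengths_map.get(uid, end - start)
--         header_text = headers_map.get(uid, uid)
--         male, female = parse_male_female(header_text)
--         candidate = (uid, length, start, end, header_text, male, female)
--         if best_any is None or length > best_any[1]:
--             best_any = candidate
--         if male is not None and female is not None and male > female:
--             if best_biased is None or length > best_biased[1]:
--                 best_biased = candidate
--     chosen = best_biased if require_male_biased and best_biased else best_any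
--     if chosen is None:
--         return None
--     uid, length, start, end, header_text, male, female = chosen
--     pval = parse_p_value(header_text)
--     return uid, length, start, end, pval, header_text
-- ===== SOURCE B (Python) =====
-- def parse_p_value(header_text: str) -> str:
--     for part in header_text.split():
--         if part.startswith("p="):
--             return part[2:]
--     return "NA"
--
-- def parse_male_female(header_text: str):
--     male = None
--     female = None
--     for part in header_text.split():
--         if part.startswith("male="):
--             try:
--                 male = int(part.split("=", 1)[1])
--             except ValueError:
--                 pass
--         elif part.startswith("female="):
--             try:
--                 female = int(part.split("=", 1)[1])
--             except ValueError:
--                 pass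
--     return male, female
--
-- def longest_unitig_for_chr(intervals_by_chr, chr_name: str, lengths_map, headers_map, require_male_biased: bool = False):
--     # Sort-based selection: rank all candidates by length (stable descending sort),
--     # then the answer is simply the first element of the ranking (or the first
--     # male-biased one when requested, falling back to the overall first).
--     if chr_name not in intervals_by_chr:
--         return None
--     candidates = [(uid, lengths_map.get(uid, end - start), start, end,
--                    headers_map.get(uid, uid))
--                   for start, end, uid in intervals_by_chr[chr_name]]
--     ranked = sorted(candidates, key=lambda c: c[1], reverse=True)
--     chosen = None
--     if require_male_biased:
--         for c in ranked:
--             male, female = parse_male_female(c[4])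
--             if male is not None and female is not None and male > female:
--                 chosen = c
--                 break
--     if chosen is None:
--         chosen = ranked[0] if ranked else None
--     if chosen is None:
--         return None
--     uid, length, start, end, header_text = chosen
--     return uid, length, start, end, parse_p_value(header_text), header_text
-- ===== Notes on version B (the rewrite author's own statement) =====
-- stated objective: alternative
-- what changed: A's single pass with two interleaved running-best accumulators is replaced by a sort-based selection: candidates are ranked once by length with a stable descending sort, and the answer is the first element of the ranking (or the first male-biased element when require_male_biased, falling back to the head); sort stability reproduces A's first-wins strict-> tie-breaking, and male/female are only parsed when the biased scan needs them.
import Mathlib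
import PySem

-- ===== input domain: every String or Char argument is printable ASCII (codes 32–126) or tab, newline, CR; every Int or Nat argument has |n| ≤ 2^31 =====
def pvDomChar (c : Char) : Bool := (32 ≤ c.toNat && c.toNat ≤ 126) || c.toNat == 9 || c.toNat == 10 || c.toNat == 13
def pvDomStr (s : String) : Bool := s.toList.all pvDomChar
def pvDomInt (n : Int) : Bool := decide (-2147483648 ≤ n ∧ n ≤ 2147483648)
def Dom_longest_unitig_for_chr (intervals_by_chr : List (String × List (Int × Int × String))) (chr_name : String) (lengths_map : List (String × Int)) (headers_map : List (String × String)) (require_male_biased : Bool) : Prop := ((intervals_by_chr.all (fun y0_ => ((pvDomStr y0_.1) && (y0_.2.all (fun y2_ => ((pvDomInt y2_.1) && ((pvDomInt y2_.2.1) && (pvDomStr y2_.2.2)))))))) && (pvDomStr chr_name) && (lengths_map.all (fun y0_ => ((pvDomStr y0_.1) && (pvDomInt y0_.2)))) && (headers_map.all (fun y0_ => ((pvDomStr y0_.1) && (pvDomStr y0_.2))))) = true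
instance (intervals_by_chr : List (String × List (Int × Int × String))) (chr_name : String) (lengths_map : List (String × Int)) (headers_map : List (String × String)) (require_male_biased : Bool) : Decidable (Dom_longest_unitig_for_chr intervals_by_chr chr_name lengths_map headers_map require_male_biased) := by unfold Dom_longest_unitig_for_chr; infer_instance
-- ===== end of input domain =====

-- B replaces A's single pass with two interleaved running-best accumulators by a stable
-- descending sort of the candidates followed by taking the first (biased) element
-- (objective: alternative sort-based algorithm; same return value proved identical).

-- ===== PORT A =====
-- shared module helpers (present identically in Source A and Source B)
-- dict.get(k, d) on an association list: first match (the type convention's dict lookup)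
def pvDictGet {α : Type} (m : List (String × α)) (k : String) (d : α) : α :=
  match m.find? (fun p => p.1 == k) with
  | some p => p.2
  | none => d

def parse_p_value_go : List String → String
  | [] => "NA"
  | p :: rest =>
    if PySem.Str.startswith p "p=" then PySem.Str.slice p (some 2) none
    else parse_p_value_go rest

def parse_p_value (header_text : String) : String :=
  parse_p_value_go (PySem.Str.split₀ header_text)

-- part.split("=", 1)[1]; in both Pythons it is only reached when "=" occurs in part,
-- so the defaults are unreachable
def pvEqTail (part : String) : String :=
  ((PySem.Str.splitMax? part "=" 1).getD []).getD 1 ""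

def parse_male_female (header_text : String) : Option Int × Option Int :=
  (PySem.Str.split₀ header_text).foldl
    (fun mf part =>
      if PySem.Str.startswith part "male=" then
        (match PySem.Int.ofStr? (pvEqTail part) with
         | some v => some v
         | none => mf.1, mf.2)          -- except ValueError: pass
      else if PySem.Str.startswith part "female=" then
        (mf.1, match PySem.Int.ofStr? (pvEqTail part) with
               | some v => some v
               | none => mf.2)
      else mf)
    (none, none)

-- A's candidate tuple (uid, length, start, end, header_text, male, female)
def pvCand (lengths_map : List (String × Int)) (headers_map : List (String × String))
    (t : Int × Int × String) : String × Int × Int × Int × String × Option Int × Option Int :=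
  let uid := t.2.2
  let length := pvDictGet lengths_map uid (t.2.1 - t.1)
  let header_text := pvDictGet headers_map uid uid
  let mf := parse_male_female header_text
  (uid, length, t.1, t.2.1, header_text, mf.1, mf.2)

-- male is not None and female is not None and male > female (on A's 7-tuple)
def pvBias (c : String × Int × Int × Int × String × Option Int × Option Int) : Bool :=
  match c.2.2.2.2.2.1, c.2.2.2.2.2.2 with
  | some m, some f => decide (f < m)
  | _, _ => false

def longest_unitig_for_chr (intervals_by_chr : List (String × List (Int × Int × String))) (chr_name : String) (lengths_map : List (String × Int)) (headers_map : List (String × String)) (require_male_biased : Bool) : Option (String × Int × Int × Int × String × String) :=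
  match intervals_by_chr.find? (fun p => p.1 == chr_name) with
  | none => none
  | some entry =>
    let s := entry.2.foldl
      (fun (s : Option (String × Int × Int × Int × String × Option Int × Option Int) ×
                Option (String × Int × Int × Int × String × Option Int × Option Int)) t =>
        let c := pvCand lengths_map headers_map t
        let best_any :=
          match s.2 with
          | none => some c
          | some m => if m.2.1 < c.2.1 then some c else some m
        let best_biased :=
          if pvBias c then
            match s.1 with
            | none => some c
            | some m => if m.2.1 < c.2.1 then some c else some m
          else s.1
        (best_biased, best_any))
      (none, none)
    let chosen := if require_male_biased && s.1.isSome then s.1 else s.2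
    match chosen with
    | none => none
    | some c => some (c.1, c.2.1, c.2.2.1, c.2.2.2.1, parse_p_value c.2.2.2.2.1, c.2.2.2.2.1)

-- ===== PORT B =====
-- B's candidate tuple (uid, length, start, end, header_text): male/female are NOT stored,
-- they are parsed on demand by the biased scan
def pvCandB (lengths_map : List (String × Int)) (headers_map : List (String × String))
    (t : Int × Int × String) : String × Int × Int × Int × String :=
  (t.2.2, pvDictGet lengths_map t.2.2 (t.2.1 - t.1), t.1, t.2.1,
   pvDictGet headers_map t.2.2 t.2.2)

-- the biased test of Source B's for-loop: parse male/female from the header and compare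
def pvBiasB (c : String × Int × Int × Int × String) : Bool :=
  match parse_male_female c.2.2.2.2 with
  | (some m, some f) => decide (f < m)
  | _ => false

def longest_unitig_for_chr_alt (intervals_by_chr : List (String × List (Int × Int × String))) (chr_name : String) (lengths_map : List (String × Int)) (headers_map : List (String × String)) (require_male_biased : Bool) : Option (String × Int × Int × Int × String × String) :=
  match intervals_by_chr.find? (fun p => p.1 == chr_name) with
  | none => none
  | some entry =>
    let candidates := entry.2.map (pvCandB lengths_map headers_map)
    -- sorted(candidates, key=lambda c: c[1], reverse=True): stable descending sort
    let ranked := PySem.List.sorted candidates (fun c => c.2.1) true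
    -- the break-on-first-biased for-loop is List.find?
    let chosen := if require_male_biased then ranked.find? pvBiasB else none
    let chosen := match chosen with
      | none => ranked.head?          -- ranked[0] if ranked else None
      | some c => some c
    match chosen with
    | none => none
    | some c => some (c.1, c.2.1, c.2.2.1, c.2.2.2.1, parse_p_value c.2.2.2.2, c.2.2.2.2)

-- ===== PRECONDITION & SPEC =====
def Spec_longest_unitig_for_chr (intervals_by_chr : List (String × List (Int × Int × String))) (chr_name : String) (lengths_map : List (String × Int)) (headers_map : List (String × String)) (require_male_biased : Bool) (out : Option (String × Int × Int × Int × String × String)) : Prop := out = longest_unitig_for_chr_alt intervals_by_chr chr_name lengths_map headers_map require_male_biased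
instance (intervals_by_chr : List (String × List (Int × Int × String))) (chr_name : String) (lengths_map : List (String × Int)) (headers_map : List (String × String)) (require_male_biased : Bool) (out : Option (String × Int × Int × Int × String × String)) : Decidable (Spec_longest_unitig_for_chr intervals_by_chr chr_name lengths_map headers_map require_male_biased out) := by unfold Spec_longest_unitig_for_chr; infer_instance

-- ===== CLAIM (what is proved, stated in full; the proofs are below) =====
def Claim_equal_longest_unitig_for_chr : Prop := ∀ (intervals_by_chr : List (String × List (Int × Int × String))) (chr_name : String) (lengths_map : List (String × Int)) (headers_map : List (String × String)) (require_male_biased : Bool), Dom_longest_unitig_for_chr intervals_by_chr chr_name lengths_map headers_map require_male_biased → Spec_longest_unitig_for_chr intervals_by_chr chr_name lengths_map headers_map require_male_biased (longest_unitig_for_chr intervals_by_chr chr_name lengths_map headers_map require_male_biased)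

-- ===== LEMMAS AND PROOFS =====
-- the first-wins running-max step (generic over a key)
def pvUpdG {α : Type} (key : α → Int) (o : Option α) (c : α) : Option α :=
  match o with
  | none => some c
  | some m => if key m < key c then some c else some m

-- A's two accumulators are right-end folds of pvUpdG over the candidate list / its biased subset
theorem pv_loop_eq (lengths_map : List (String × Int)) (headers_map : List (String × String))
    (l : List (Int × Int × String)) :
    ∀ bb ba : Option (String × Int × Int × Int × String × Option Int × Option Int),
      l.foldl
        (fun (s : Option (String × Int × Int × Int × String × Option Int × Option Int) ×
                  Option (String × Int × Int × Int × String × Option Int × Option Int)) t =>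
          let c := pvCand lengths_map headers_map t
          let best_any :=
            match s.2 with
            | none => some c
            | some m => if m.2.1 < c.2.1 then some c else some m
          let best_biased :=
            if pvBias c then
              match s.1 with
              | none => some c
              | some m => if m.2.1 < c.2.1 then some c else some m
            else s.1
          (best_biased, best_any))
        (bb, ba)
      = (((l.map (pvCand lengths_map headers_map)).filter pvBias).foldl (pvUpdG (fun c => c.2.1)) bb,
         (l.map (pvCand lengths_map headers_map)).foldl (pvUpdG (fun c => c.2.1)) ba) := by
  induction l with
  | nil => intro bb ba; rfl
  | cons a l ih =>
    intro bb ba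
    simp only [List.foldl_cons, List.map_cons, List.filter_cons]
    by_cases h : pvBias (pvCand lengths_map headers_map a)
    · simp only [h, if_pos, ih, List.foldl_cons]
      cases bb <;> cases ba <;> simp [pvUpdG]
    · simp only [h, ih]
      cases ba <;> simp [pvUpdG]

-- inserting into a descending list: find? picks the earlier tie, later strictly-greater wins
theorem pv_find?_insertBy {α : Type} (key : α → Int) (p : α → Bool) :
    ∀ (S : List α), S.Pairwise (fun a b => key b ≤ key a) → ∀ c,
      (PySem.List.insertBy (fun a b => decide (key b < key a)) c S).find? p
        = if p c then pvUpdG key (S.find? p) c else S.find? p := by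
  intro S
  induction S with
  | nil =>
    intro _ c
    by_cases h : p c <;> simp [PySem.List.insertBy, List.find?, h, pvUpdG]
  | cons y S' ih =>
    intro hp c
    have hy : ∀ b ∈ S', key b ≤ key y := (List.pairwise_cons.mp hp).1
    have hp' : S'.Pairwise (fun a b => key b ≤ key a) := (List.pairwise_cons.mp hp).2
    by_cases hlt : key y < key c
    · -- c goes in front
      have : PySem.List.insertBy (fun a b => decide (key b < key a)) c (y :: S')
          = c :: y :: S' := by simp [PySem.List.insertBy, hlt]
      rw [this]
      by_cases hc : p c
      · cases hfind : (y :: S').find? p with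
        | none => rw [List.find?_cons_of_pos hc]; simp [pvUpdG, hc]
        | some m =>
          have hm : m ∈ y :: S' := List.mem_of_find?_eq_some hfind
          have hmc : key m < key c := by
            rcases List.mem_cons.mp hm with rfl | hm'
            · exact hlt
            · exact lt_of_le_of_lt (hy m hm') hlt
          rw [List.find?_cons_of_pos hc]
          simp [pvUpdG, hc, hmc]
      · rw [List.find?_cons_of_neg (by simp [hc])]
        simp [hc]
    · -- c goes after y
      have : PySem.List.insertBy (fun a b => decide (key b < key a)) c (y :: S')
          = y :: PySem.List.insertBy (fun a b => decide (key b < key a)) c S' := by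
        simp [PySem.List.insertBy, hlt]
      rw [this]
      by_cases hyp : p y
      · rw [List.find?_cons_of_pos hyp, List.find?_cons_of_pos hyp]
        by_cases hc : p c
        · simp [hc, pvUpdG, hlt]
        · simp [hc]
      · rw [List.find?_cons_of_neg (by simp [hyp]), List.find?_cons_of_neg (by simp [hyp]),
          ih hp' c]

-- find? over the stable descending sort = the first-wins running max of the filtered list
theorem pv_find?_sorted (key : α → Int) (p : α → Bool) (cl : List α) :
    (PySem.List.sorted cl key true).find? p
      = (cl.filter p).foldl (pvUpdG key) none := by
  induction cl using List.reverseRecOn with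
  | nil => rfl
  | append_singleton cl c ih =>
    have hsort : PySem.List.sorted (cl ++ [c]) key true
        = PySem.List.insertBy (fun a b => decide (key b < key a)) c
            (PySem.List.sorted cl key true) := by
      rw [PySem.List.sorted_rev_eq_foldl_insertBy, PySem.List.sorted_rev_eq_foldl_insertBy,
        List.foldl_append]
      rfl
    have hpair : (PySem.List.sorted cl key true).Pairwise (fun a b => key b ≤ key a) :=
      PySem.List.sorted_pairwise_rev cl key
    rw [hsort, pv_find?_insertBy key p _ hpair c, ih, List.filter_append, List.foldl_append]
    by_cases hc : p c <;> simp [hc]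

-- head? of the descending sort = the first-wins running max of the whole list
theorem pv_head?_sorted (key : α → Int) (cl : List α) :
    (PySem.List.sorted cl key true).head? = cl.foldl (pvUpdG key) none := by
  have h := pv_find?_sorted key (fun _ => true) cl
  have hfind : ∀ (xs : List α), xs.find? (fun _ => true) = xs.head? := by
    intro xs; cases xs <;> simp [List.find?]
  rw [hfind] at h
  simpa using h

-- projection from A's 7-tuple candidate to B's 5-tuple candidate, and its section
def pvProj (c : String × Int × Int × Int × String × Option Int × Option Int) :
    String × Int × Int × Int × String :=
  (c.1, c.2.1, c.2.2.1, c.2.2.2.1, c.2.2.2.2.1)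

def pvExt (c : String × Int × Int × Int × String) :
    String × Int × Int × Int × String × Option Int × Option Int :=
  (c.1, c.2.1, c.2.2.1, c.2.2.2.1, c.2.2.2.2,
   (parse_male_female c.2.2.2.2).1, (parse_male_female c.2.2.2.2).2)

theorem pvBias_ext (c : String × Int × Int × Int × String) :
    pvBias (pvExt c) = pvBiasB c := by
  unfold pvBias pvExt pvBiasB
  cases h : parse_male_female c.2.2.2.2 with
  | mk m f => cases m <;> cases f <;> simp

theorem pvUpd_ext (o : Option (String × Int × Int × Int × String))
    (c : String × Int × Int × Int × String) :
    pvUpdG (fun c => c.2.1) (o.map pvExt) (pvExt c)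
      = (pvUpdG (fun c => c.2.1) o c).map pvExt := by
  cases o with
  | none => rfl
  | some m =>
    simp only [Option.map_some, pvUpdG, pvExt]
    by_cases h : m.2.1 < c.2.1 <;> simp [h, pvExt]

theorem pvFoldl_ext (l : List (String × Int × Int × Int × String)) :
    ∀ o, (l.map pvExt).foldl (pvUpdG (fun c => c.2.1)) (o.map pvExt)
      = (l.foldl (pvUpdG (fun c => c.2.1)) o).map pvExt := by
  induction l with
  | nil => intro o; rfl
  | cons a l ih =>
    intro o
    simp only [List.map_cons, List.foldl_cons, pvUpd_ext, ih]

-- ===== VERDICT (by name: the statement is the Claim_ definition above) =====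
theorem longest_unitig_for_chr_spec : Claim_equal_longest_unitig_for_chr := by
  intro ivs cn lm hm rmb _
  unfold Spec_longest_unitig_for_chr longest_unitig_for_chr longest_unitig_for_chr_alt
  cases h : ivs.find? (fun p => p.1 == cn) with
  | none => rfl
  | some entry =>
    simp only [pv_loop_eq]
    have hmap : entry.2.map (pvCand lm hm) = (entry.2.map (pvCandB lm hm)).map pvExt := by
      rw [List.map_map]; exact List.map_congr_left (fun t _ => rfl)
    set cands := entry.2.map (pvCandB lm hm) with hc
    have hba : (entry.2.map (pvCand lm hm)).foldl (pvUpdG (fun c => c.2.1)) none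
        = (cands.foldl (pvUpdG (fun c => c.2.1)) none).map pvExt := by
      rw [hmap]
      have := pvFoldl_ext cands none
      simpa using this
    have hfilter : (entry.2.map (pvCand lm hm)).filter pvBias
        = (cands.filter pvBiasB).map pvExt := by
      rw [hmap, List.filter_map]
      congr 1
      apply List.filter_congr
      intro x _
      simp [Function.comp, pvBias_ext]
    have hbb : ((entry.2.map (pvCand lm hm)).filter pvBias).foldl (pvUpdG (fun c => c.2.1)) none
        = ((cands.filter pvBiasB).foldl (pvUpdG (fun c => c.2.1)) none).map pvExt := by
      rw [hfilter]
      have := pvFoldl_ext (cands.filter pvBiasB) none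
      simpa using this
    rw [hba, hbb, pv_find?_sorted (fun c => c.2.1) pvBiasB cands,
      pv_head?_sorted (fun c => c.2.1) cands]
    set bb := (cands.filter pvBiasB).foldl (pvUpdG (fun c => c.2.1)) none
    set ba := cands.foldl (pvUpdG (fun c => c.2.1)) none
    cases rmb with
    | false => cases ba <;> rfl
    | true => cases bb <;> cases ba <;> rfl
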